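-- pv_equiv track=rewrite | github.com/ChipFlow/ieee754fpu | src/ieee754/div_rem_sqrt_rsqrt/test_core.py | shifted_ints
-- ===== SOURCE A (Python) =====
-- def shifted_ints(total_bits, int_bits):
--     """ Generate a sequence like a generalized binary version of A037124.
--
--         See https://oeis.org/A037124
--
--         Generates the sequence of all non-negative integers ``n`` in ascending
--         order with no repeats where ``n < (1 << total_bits) and n == (v << i)``
--         where ``i`` is a non-negative integer and ``v`` is a non-negative
--         integer less than ``1 << int_bits``.
--     """
--     n = 0
--     while n < (1 << total_bits):
--         yield n
--         if n < (1 << int_bits):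
--             n += 1
--         else:
--             n += 1 << (n.bit_length() - int_bits)
-- ===== SOURCE B (Python) =====
-- def shifted_ints(total_bits, int_bits):
--     limit = 1 << total_bits
--     n = 0
--     while n < limit and n < (1 << int_bits):
--         yield n
--         n += 1
--     boundary = 1 << int_bits
--     step = 2
--     while boundary < limit:
--         while n < (boundary << 1) and n < limit:
--             yield n
--             n += step
--         boundary <<= 1
--         step <<= 1
-- ===== Notes on version B (the rewrite author's own statement) =====
-- stated objective: alternative
-- what changed: Replaces A's single loop that recomputes n.bit_length() on every iteration to pick the increment with a dense-prefix loop followed by per-octave inner loops that thread the running value n and maintain doubling boundary/step counters, so no bit_length is ever computed.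
import Mathlib
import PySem

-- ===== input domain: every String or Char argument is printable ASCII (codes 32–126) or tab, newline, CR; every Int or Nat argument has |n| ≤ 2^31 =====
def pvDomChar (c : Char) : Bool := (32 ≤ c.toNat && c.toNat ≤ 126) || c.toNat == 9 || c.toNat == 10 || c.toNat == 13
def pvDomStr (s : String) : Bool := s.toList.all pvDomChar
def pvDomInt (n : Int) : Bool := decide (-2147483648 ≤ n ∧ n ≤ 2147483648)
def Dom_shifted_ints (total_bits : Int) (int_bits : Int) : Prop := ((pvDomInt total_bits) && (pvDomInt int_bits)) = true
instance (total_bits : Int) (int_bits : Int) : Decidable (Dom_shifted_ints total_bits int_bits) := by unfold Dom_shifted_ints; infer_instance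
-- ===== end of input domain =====

-- B replaces A's per-element bit_length computation by a dense prefix loop followed by
-- per-octave inner loops that thread the running value and double boundary/step together
-- (a different loop decomposition; same output list).

-- ===== PORT A =====
-- A's while loop: n state (always nonnegative here, kept as Nat), yields collected into a list.
-- Python's n.bit_length() is PySem.Int.bitLength.
def loopA (T I : Nat) (n : Nat) : List Int :=
  if h : n < 2 ^ T then
    (n : Int) ::
      loopA T I (if n < 2 ^ I then n + 1
                 else n + 2 ^ (PySem.Int.bitLength (n : Int) - I))
  else []
termination_by 2 ^ T - n
decreasing_by
  split
  · omega
  · have := Nat.two_pow_pos (PySem.Int.bitLength (n : Int) - I); omega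

-- negative shift counts make Python's `1 << _` raise ValueError; those inputs are outside Pre_
def shifted_ints (total_bits : Int) (int_bits : Int) : List Int :=
  if 0 ≤ total_bits ∧ 0 ≤ int_bits then loopA total_bits.toNat int_bits.toNat 0 else []

-- ===== PORT B =====
-- dense prefix: while n < limit and n < (1 << int_bits): yield n; n += 1   (returns yields and final n)
def denseB (limit bI n : Nat) : List Int × Nat :=
  if h : n < limit ∧ n < bI then
    let r := denseB limit bI (n + 1)
    ((n : Int) :: r.1, r.2)
  else ([], n)
termination_by limit - n

-- inner loop: while n < (boundary << 1) and n < limit: yield n; n += step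
def innerB (limit bound2 step : Nat) (hs : 0 < step) (n : Nat) : List Int × Nat :=
  if h : n < bound2 ∧ n < limit then
    let r := innerB limit bound2 step hs (n + step)
    ((n : Int) :: r.1, r.2)
  else ([], n)
termination_by limit - n

-- outer loop: while boundary < limit: inner loop; boundary <<= 1; step <<= 1
def outerB (limit boundary step : Nat) (hb : 0 < boundary) (hs : 0 < step) (n : Nat) : List Int :=
  if h : boundary < limit then
    let r := innerB limit (boundary * 2) step hs n
    r.1 ++ outerB limit (boundary * 2) (step * 2) (by omega) (by omega) r.2
  else []
termination_by limit - boundary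
decreasing_by omega

def shifted_ints_alt (total_bits : Int) (int_bits : Int) : List Int :=
  if 0 ≤ total_bits ∧ 0 ≤ int_bits then
    (denseB (2 ^ total_bits.toNat) (2 ^ int_bits.toNat) 0).1 ++
      outerB (2 ^ total_bits.toNat) (2 ^ int_bits.toNat) 2 (Nat.two_pow_pos _) (by omega)
        (denseB (2 ^ total_bits.toNat) (2 ^ int_bits.toNat) 0).2
  else []

-- ===== PRECONDITION & SPEC =====
-- Python A raises ValueError ("negative shift count") when total_bits < 0, or when
-- int_bits < 0 and at least one element is yielded; Pre_ keeps the natural domain of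
-- nonnegative bit widths.
def Pre_shifted_ints (total_bits : Int) (int_bits : Int) : Prop :=
  0 ≤ total_bits ∧ 0 ≤ int_bits
instance (total_bits : Int) (int_bits : Int) : Decidable (Pre_shifted_ints total_bits int_bits) := by
  unfold Pre_shifted_ints; infer_instance

def pvWitness_shifted_ints : Int × Int := (4, 2)

def Spec_shifted_ints (total_bits : Int) (int_bits : Int) (out : List Int) : Prop := out = shifted_ints_alt total_bits int_bits
instance (total_bits : Int) (int_bits : Int) (out : List Int) : Decidable (Spec_shifted_ints total_bits int_bits out) := by unfold Spec_shifted_ints; infer_instance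

-- ===== CLAIM (what is proved, stated in full; the proofs are below) =====
def Claim_equal_shifted_ints : Prop := ∀ (total_bits : Int) (int_bits : Int), Dom_shifted_ints total_bits int_bits → Pre_shifted_ints total_bits int_bits → Spec_shifted_ints total_bits int_bits (shifted_ints total_bits int_bits)

-- ===== LEMMAS AND PROOFS =====

-- once the running value reaches the limit, the octave loop only doubles boundary/step and yields nothing
theorem outerB_of_le (limit b s : Nat) (hb : 0 < b) (hs : 0 < s) (n : Nat) (hn : limit ≤ n) :
    outerB limit b s hb hs n = [] := by
  rw [outerB]
  split
  · rw [innerB, dif_neg (by omega)]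
    exact outerB_of_le limit (b * 2) (s * 2) (by omega) (by omega) n hn
  · rfl
termination_by limit - b
decreasing_by omega

-- unrolling one yield of the inner loop through outerB
theorem outerB_cons (limit b s : Nat) (hb : 0 < b) (hs : 0 < s) (n : Nat)
    (h1 : b < limit) (h2 : n < b * 2) (h3 : n < limit) :
    outerB limit b s hb hs n = (n : Int) :: outerB limit b s hb hs (n + s) := by
  conv_lhs => rw [outerB]
  conv_rhs => rw [outerB]
  rw [dif_pos h1, dif_pos h1, innerB, dif_pos ⟨h2, h3⟩]
  simp

-- when the running value has left the current octave, the inner loop is empty and boundary/step double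
theorem outerB_advance (limit b s : Nat) (hb : 0 < b) (hs : 0 < s) (n : Nat)
    (h1 : b < limit) (h2 : b * 2 ≤ n) (hb' : 0 < b * 2) (hs' : 0 < s * 2) :
    outerB limit b s hb hs n = outerB limit (b * 2) (s * 2) hb' hs' n := by
  rw [outerB, dif_pos h1, innerB, dif_neg (by omega)]
  simp

-- Python's n.bit_length() on 2^m ≤ n < 2^(m+1) is m+1
theorem bitLen_eq (m n : Nat) (h1 : 2 ^ m ≤ n) (h2 : n < 2 ^ (m + 1)) :
    PySem.Int.bitLength (n : Int) = m + 1 := by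
  have hp := Nat.two_pow_pos m
  have hn0 : (n : Int) ≠ 0 := Int.natCast_ne_zero.mpr (by omega)
  have hlt := PySem.Int.lt_two_pow_bitLength (n : Int)
  have hle := PySem.Int.two_pow_bitLength_le (n : Int) hn0
  simp only [Int.natAbs_natCast] at hlt hle
  set L := PySem.Int.bitLength (n : Int) with hL
  by_contra hne
  rcases Nat.lt_or_ge L (m + 1) with h | h
  · have : 2 ^ L ≤ 2 ^ m := Nat.pow_le_pow_right (by omega) (by omega)
    omega
  · have : 2 ^ (m + 1) ≤ 2 ^ (L - 1) := Nat.pow_le_pow_right (by omega) (by omega)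
    omega

-- main octave invariant: with boundary = 2^(int_bits+k) ≤ n < 2*boundary and step = 2^(k+1),
-- A's remaining loop equals B's octave loop
theorem main_octave (T I k n b s : Nat) (hbk : b = 2 ^ (I + k)) (hsk : s = 2 ^ (k + 1))
    (h1 : b ≤ n) (h2 : n < b * 2) (hb : 0 < b) (hs : 0 < s) :
    loopA T I n = outerB (2 ^ T) b s hb hs n := by
  by_cases hn : n < 2 ^ T
  · have hIle : 2 ^ I ≤ b := hbk ▸ Nat.pow_le_pow_right (by omega) (by omega)
    have hIb : ¬ n < 2 ^ I := by omega
    have hb2 : b * 2 = 2 ^ (I + k + 1) := by rw [hbk, ← pow_succ]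
    have hbl : PySem.Int.bitLength (n : Int) = I + k + 1 :=
      bitLen_eq (I + k) n (hbk ▸ h1) (by omega)
    rw [loopA, dif_pos hn, if_neg hIb, hbl]
    have hstep : (I + k + 1) - I = k + 1 := by omega
    rw [hstep, ← hsk]
    rw [outerB_cons _ _ _ hb hs n (by omega) h2 hn]
    congr 1
    by_cases hk : n + s < b * 2
    · exact main_octave T I k (n + s) b s hbk hsk (by omega) hk hb hs
    · have hsle : s ≤ b * 2 := by
        rw [hsk, hb2]; exact Nat.pow_le_pow_right (by omega) (by omega)
      rw [outerB_advance _ _ _ hb hs _ (by omega) (by omega) (by omega) (by omega)]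
      exact main_octave T I (k + 1) (n + s) (b * 2) (s * 2)
        (by rw [hbk, ← pow_succ, Nat.add_assoc]) (by rw [hsk, ← pow_succ]) (by omega) (by omega)
        (by omega) (by omega)
  · rw [loopA, dif_neg hn]
    exact (outerB_of_le _ _ _ hb hs n (by omega)).symm
termination_by 2 ^ T - n
decreasing_by
  · omega
  · omega

-- dense prefix: A's loop from n ≤ 2^I equals B's dense loop followed by the octave loops
theorem prefix_eq (T I n : Nat) (hn : n ≤ 2 ^ I) (hb : 0 < 2 ^ I) (hs : (0:Nat) < 2) :
    loopA T I n = (denseB (2 ^ T) (2 ^ I) n).1 ++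
      outerB (2 ^ T) (2 ^ I) 2 hb hs (denseB (2 ^ T) (2 ^ I) n).2 := by
  by_cases h : n < 2 ^ T ∧ n < 2 ^ I
  · rw [loopA, dif_pos h.1, if_pos h.2, denseB, dif_pos h]
    simp only [List.cons_append]
    rw [prefix_eq T I (n + 1) (by omega) hb hs]
  · rw [denseB, dif_neg h]
    by_cases hT : n < 2 ^ T
    · have hge : 2 ^ I ≤ n := by omega
      exact main_octave T I 0 n (2 ^ I) 2 (by rw [Nat.add_zero]) (by norm_num) hge (by omega) hb hs
    · rw [loopA, dif_neg hT]
      exact (outerB_of_le _ _ _ hb hs n (by omega)).symm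
termination_by 2 ^ I - n
decreasing_by omega

-- ===== VERDICT (by name: the statement is the Claim_ definition above) =====
theorem shifted_ints_spec : Claim_equal_shifted_ints := by
  intro total_bits int_bits _ hpre
  unfold Spec_shifted_ints shifted_ints shifted_ints_alt
  simp only [Pre_shifted_ints] at hpre
  rw [if_pos hpre, if_pos hpre]
  exact prefix_eq total_bits.toNat int_bits.toNat 0 (Nat.zero_le _) (Nat.two_pow_pos _) (by norm_num)
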